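-- pv_equiv track=rewrite | github.com/jaric-thorning/summary | summary.py | getRelativeDir
-- ===== SOURCE A (Python) =====
-- def getRelativeDir(directory):
-- 	foundRoot = False
-- 	relativeDir = ""
-- 	localDir = ""
-- 	directoryLookBack = -1
-- 	while(localDir == ""):
-- 		localDir = directory.split("/")[directoryLookBack]
-- 		directoryLookBack -= 1
-- 		if(directoryLookBack > len(directory.split("/"))):
-- 			localDir = directory
-- 			break
-- 	for d in directory.split("/"):
-- 		if(d == "1.0 Financial"):
-- 			foundRoot = True
--
-- 		if foundRoot:
-- 			relativeDir += d
-- 			if(d != ""):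
-- 				relativeDir += "/"
--
-- 	if(foundRoot == False):
-- 		relativeDir = directory
--
-- 	return relativeDir, localDir
-- ===== SOURCE B (Python) =====
-- def getRelativeDir(directory):
--     # local segment: trim trailing slashes, then cut after the last remaining slash
--     trimmed = directory.rstrip('/')
--     localDir = trimmed[trimmed.rfind('/') + 1:]
--     # relative path: whole-segment substring search with '/' sentinels instead of a flag scan
--     if '/1.0 Financial/' in '/' + directory + '/':
--         parts = directory.split('/')
--         while parts[0] != '1.0 Financial':
--             parts = parts[1:]
--         relativeDir = ''.join(p + '/' for p in parts if p)
--     else: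
--         relativeDir = directory
--     return relativeDir, localDir
-- ===== Notes on version B (the rewrite author's own statement) =====
-- stated objective: alternative
-- what changed: B works at string level instead of scanning the split list: the local segment comes from rstrip('/') plus rfind('/') slicing (replacing A's backwards while-loop that re-splits the string each iteration), and the marker is detected by a '/'-sentinel substring test on '/'+directory+'/' with a front-drop pass building the relative path (replacing A's flag-carrying accumulation fold).
-- outside the precondition, e.g. on getRelativeDir('/'): A raises IndexError, B returns ('/', '')
import Mathlib
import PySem

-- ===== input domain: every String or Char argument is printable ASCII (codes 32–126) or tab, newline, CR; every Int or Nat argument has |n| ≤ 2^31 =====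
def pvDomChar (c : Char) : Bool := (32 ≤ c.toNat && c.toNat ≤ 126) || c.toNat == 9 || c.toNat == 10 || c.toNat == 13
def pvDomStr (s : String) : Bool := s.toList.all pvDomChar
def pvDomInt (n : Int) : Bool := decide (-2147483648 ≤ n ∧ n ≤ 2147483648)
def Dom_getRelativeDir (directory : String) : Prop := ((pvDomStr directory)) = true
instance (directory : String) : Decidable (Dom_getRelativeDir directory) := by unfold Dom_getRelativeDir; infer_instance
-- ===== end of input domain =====

-- B replaces A's reverse while-scan and flag-carrying fold by string-level operations:
-- rstrip('/') + rfind('/') slicing for the local segment, and a '/'-sentinel substring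
-- membership test plus a front-drop pass for the relative path (objective: alternative).

-- ===== PORT A =====
-- the while-loop: localDir = directory.split("/")[directoryLookBack]; directoryLookBack -= 1;
-- dead break kept as in the source; fuel makes the recursion structural, pyGet? none = IndexError
-- (both excluded by Pre_, so the defaults returned there are never claimed about)
def pvLoopA (directory : String) (parts : List String) (lookback : Int) : Nat → String
  | 0 => ""
  | fuel + 1 =>
    match PySem.List.pyGet? parts lookback with
    | none => ""  -- IndexError in Python; outside Pre_
    | some ld =>
      let lookback' := lookback - 1
      if lookback' > (parts.length : Int) then directory
      else if ld = "" then pvLoopA directory parts lookback' fuel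
      else ld

def getRelativeDir (directory : String) : String × String :=
  let parts := (PySem.Str.split? directory "/").getD []   -- sep "/" ≠ "", so split? is always some
  let localDir := pvLoopA directory parts (-1) (parts.length + 1)
  let st := parts.foldl
    (fun (st : Bool × String) d =>
      let foundRoot := if d = "1.0 Financial" then true else st.1
      if foundRoot then
        (foundRoot, st.2 ++ d ++ (if d ≠ "" then "/" else ""))
      else (foundRoot, st.2))
    (false, "")
  let relativeDir := if st.1 = false then directory else st.2
  (relativeDir, localDir)

-- ===== PORT B =====
-- B's 'while parts[0] != marker: parts = parts[1:]' loop; [] case = Python's IndexError,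
-- unreachable because the loop only runs after the membership test succeeded
def pvDropRec : List String → List String
  | [] => []
  | p :: rest => if p = "1.0 Financial" then p :: rest else pvDropRec rest

def getRelativeDir_alt (directory : String) : String × String :=
  -- directory.rstrip('/') ported by hand (PySem.Chars.rstrip strips whitespace, not given chars);
  -- exact: drops exactly the trailing '/' characters
  let trimmed := String.ofList ((directory.toList.reverse.dropWhile (fun c => c = '/')).reverse)
  let localDir := PySem.Str.slice trimmed (some (PySem.Str.rfind trimmed "/" + 1)) none
  let relativeDir :=
    if PySem.Str.isIn "/1.0 Financial/" ("/" ++ directory ++ "/") then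
      let parts := (PySem.Str.split? directory "/").getD []
      PySem.Str.join "" (((pvDropRec parts).filter (fun p => p ≠ "")).map (fun p => p ++ "/"))
    else directory
  (relativeDir, localDir)

-- ===== PRECONDITION & SPEC =====
-- Pre_ excludes exactly the inputs made of '/' only (including ""), on which A's while-loop
-- runs off the list and raises IndexError.
def Pre_getRelativeDir (directory : String) : Prop :=
  directory.toList.any (fun c => c ≠ '/') = true
instance (directory : String) : Decidable (Pre_getRelativeDir directory) := by
  unfold Pre_getRelativeDir; infer_instance
def pvWitness_getRelativeDir : String := "a/1.0 Financial/b"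

def Spec_getRelativeDir (directory : String) (out : String × String) : Prop :=
  out = getRelativeDir_alt directory
instance (directory : String) (out : String × String) : Decidable (Spec_getRelativeDir directory out) := by
  unfold Spec_getRelativeDir; infer_instance

-- ===== CLAIM (what is proved, stated in full; the proofs are below) =====
def Claim_equal_getRelativeDir : Prop := ∀ (directory : String), Dom_getRelativeDir directory → Pre_getRelativeDir directory → Spec_getRelativeDir directory (getRelativeDir directory)

-- ===== LEMMAS AND PROOFS =====

-- recursive characterisation of Python's split('/') used by the proofs only
def pvSplit : List Char → List (List Char)
  | [] => [[]]
  | c :: cs => if c = '/' then [] :: pvSplit cs else (pvSplit cs).modifyHead (c :: ·)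

theorem pvSplit_cases (cs : List Char) :
    ('/' ∉ cs ∧ pvSplit cs = [cs]) ∨
      ∃ h rest, cs = h ++ '/' :: rest ∧ '/' ∉ h ∧ pvSplit cs = h :: pvSplit rest := by
  induction cs with
  | nil => exact Or.inl ⟨by simp, rfl⟩
  | cons c cs ih =>
    by_cases hc : c = '/'
    · subst hc
      exact Or.inr ⟨[], cs, by simp, by simp, by simp [pvSplit]⟩
    · rcases ih with ⟨hni, heq⟩ | ⟨h, rest, hdec, hni, heq⟩
      · exact Or.inl ⟨by simp [hni, Ne.symm hc], by simp [pvSplit, hc, heq]⟩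
      · refine Or.inr ⟨c :: h, rest, by simp [hdec], by simp [hni, Ne.symm hc], ?_⟩
        simp [pvSplit, hc, heq]

theorem pvSplit_shape (cs : List Char) : ∃ h t, pvSplit cs = h :: t := by
  rcases pvSplit_cases cs with ⟨_, h⟩ | ⟨a, r, _, _, h⟩
  · exact ⟨cs, [], h⟩
  · exact ⟨a, pvSplit r, h⟩

theorem splitOn_go_eq (fuel : Nat) :
    ∀ (l cur : List Char) (acc : List (List Char)), l.length < fuel →
      PySem.Chars.splitOn.go ['/'] fuel l cur acc
        = acc.reverse ++ (pvSplit l).modifyHead (cur.reverse ++ ·) := by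
  induction fuel with
  | zero => intro l cur acc h; omega
  | succ f ih =>
    intro l cur acc h
    cases l with
    | nil =>
      rw [PySem.Chars.splitOn.go]
      · simp [pvSplit]
      · omega
    | cons c rest =>
      rw [PySem.Chars.splitOn.go]
      by_cases hc : c = '/'
      · subst hc
        have hp : List.isPrefixOf ['/'] ('/' :: rest) = true := by
          simp [List.isPrefixOf]
        rw [if_pos hp]
        have hdr : List.drop (List.length ['/']) ('/' :: rest) = rest := by simp
        rw [hdr, ih rest [] (cur.reverse :: acc) (by simp at h ⊢; omega)]
        obtain ⟨hd, t, hht⟩ := pvSplit_shape rest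
        simp [pvSplit, hht]
      · have hp : ¬ (List.isPrefixOf ['/'] (c :: rest) = true) := by
          simp [List.isPrefixOf, Ne.symm hc]
        rw [if_neg hp, ih rest (c :: cur) acc (by simp at h ⊢; omega)]
        obtain ⟨hd, t, hht⟩ := pvSplit_shape rest
        simp [pvSplit, hc, hht]

theorem splitOn_eq_pvSplit (cs : List Char) : PySem.Chars.splitOn cs ['/'] = pvSplit cs := by
  rw [PySem.Chars.splitOn, splitOn_go_eq (cs.length + 1) cs [] [] (by omega)]
  obtain ⟨hd, t, hht⟩ := pvSplit_shape cs
  simp [hht]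

theorem parts_eq (directory : String) :
    (PySem.Str.split? directory "/").getD []
      = (pvSplit directory.toList).map String.ofList := by
  have h := PySem.Str.split?_map directory "/"
  rw [show PySem.Chars.split? directory.toList ("/").toList
        = some (PySem.Chars.splitOn directory.toList ("/").toList) from by
      simp [PySem.Chars.split?]] at h
  cases hsplit : PySem.Str.split? directory "/" with
  | none => rw [hsplit] at h; simp at h
  | some L =>
    rw [hsplit] at h
    simp only [Option.map_some, Option.some.injEq] at h
    rw [Option.getD_some]
    have hL : L = (L.map String.toList).map String.ofList := by
      simp [List.map_map, Function.comp_def]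
    rw [hL, h]
    have h2 : ("/" : String).toList = ['/'] := by decide
    rw [h2, splitOn_eq_pvSplit]

theorem pvSplit_app (x y : List Char) : pvSplit (x ++ '/' :: y) = pvSplit x ++ pvSplit y := by
  induction x with
  | nil => simp [pvSplit]
  | cons c x ih =>
    by_cases hc : c = '/'
    · subst hc; simp [pvSplit, ih]
    · obtain ⟨h, t, hht⟩ := pvSplit_shape x
      simp [pvSplit, hc, ih, hht]

theorem pvSplit_noslash (x : List Char) (h : '/' ∉ x) : pvSplit x = [x] := by
  induction x with
  | nil => rfl
  | cons c x ih =>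
    have hc : c ≠ '/' := fun hh => h (hh ▸ List.mem_cons_self ..)
    rw [pvSplit, if_neg hc, ih (fun hm => h (List.mem_cons_of_mem _ hm))]
    rfl

theorem pvSplit_app_rep (x : List Char) (k : Nat) :
    pvSplit (x ++ List.replicate k '/') = pvSplit x ++ List.replicate k [] := by
  induction k with
  | zero => simp
  | succ k ih =>
    have h1 : x ++ List.replicate (k+1) '/' = (x ++ List.replicate k '/') ++ '/' :: [] := by
      rw [List.replicate_succ' (n := k)]; simp
    rw [h1, pvSplit_app, ih]
    have h2 : pvSplit [] = [[]] := rfl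
    rw [h2, List.replicate_succ' (n := k)]
    simp

theorem slash_isPrefixOf (l : List Char) :
    List.isPrefixOf ['/'] l = true ↔ ∃ t, l = '/' :: t := by
  cases l with
  | nil => simp [List.isPrefixOf]
  | cons c t =>
    constructor
    · intro hp
      have h' : '/' = c := beq_iff_eq.mp (by
        have := hp
        rw [show List.isPrefixOf ['/'] (c :: t) = (('/' == c) && List.isPrefixOf [] t) from rfl] at this
        exact (Bool.and_eq_true _ _ ▸ this).1)
      exact ⟨t, by rw [← h']⟩
    · rintro ⟨t', ht'⟩
      cases ht'
      rfl

theorem rfind_go_noslash (s : List Char) (h : '/' ∉ s) :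
    ∀ j, PySem.Chars.rfind.go s ['/'] j = -1 := by
  intro j
  induction j with
  | zero =>
    rw [PySem.Chars.rfind.go]
    rw [if_neg]
    intro hp
    obtain ⟨t, ht⟩ := (slash_isPrefixOf s).mp hp
    exact h (ht ▸ List.mem_cons_self ..)
  | succ j ih =>
    rw [PySem.Chars.rfind.go]
    rw [if_neg, ih]
    intro hp
    obtain ⟨t, ht⟩ := (slash_isPrefixOf _).mp hp
    have : '/' ∈ List.drop (j+1) s := ht ▸ List.mem_cons_self ..
    exact h (List.mem_of_mem_drop this)

theorem rfind_go_found (x v : List Char) (hv : '/' ∉ v) :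
    ∀ d, d ≤ v.length + 1 →
      PySem.Chars.rfind.go (x ++ '/' :: v) ['/'] (x.length + d) = (x.length : Int) := by
  intro d
  induction d with
  | zero =>
    intro _
    rw [Nat.add_zero]
    cases hx : x.length with
    | zero =>
      have hxe : x = [] := List.length_eq_zero_iff.mp hx
      subst hxe
      rw [PySem.Chars.rfind.go, List.nil_append, if_pos ((slash_isPrefixOf _).mpr ⟨v, rfl⟩)]
      simp
    | succ n =>
      rw [PySem.Chars.rfind.go]
      have hdrop : List.drop (n+1) (x ++ '/' :: v) = '/' :: v := by
        rw [show n + 1 = x.length from hx.symm, List.drop_left]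
      rw [hdrop, if_pos ((slash_isPrefixOf _).mpr ⟨v, rfl⟩)]
  | succ d ih =>
    intro hd
    rw [show x.length + (d+1) = (x.length + d) + 1 from rfl, PySem.Chars.rfind.go]
    have hdrop : List.drop (x.length + d + 1) (x ++ '/' :: v) = List.drop d v := by
      have h0 : List.drop (x.length + d + 1) x = [] := List.drop_eq_nil_of_le (by omega)
      rw [List.drop_append, h0, List.nil_append,
        show x.length + d + 1 - x.length = d + 1 by omega, List.drop_succ_cons]
    rw [hdrop, if_neg, ih (by omega)]
    intro hp
    obtain ⟨t, ht⟩ := (slash_isPrefixOf _).mp hp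
    exact hv (List.mem_of_mem_drop (ht ▸ List.mem_cons_self ..))

theorem infix_padded_mp (cs m : List Char) :
    ('/' :: m ++ ['/']) <:+: ('/' :: cs ++ ['/'])
      → ∃ x y, cs = x ++ m ++ y ∧ (x = [] ∨ ∃ x0, x = x0 ++ ['/'])
          ∧ (y = [] ∨ ∃ y', y = '/' :: y') := by
  rintro ⟨a, b, hab⟩
  cases a with
  | nil =>
    simp only [List.nil_append, List.cons_append, List.append_assoc] at hab
    have h1 : m ++ '/' :: b = cs ++ ['/'] := by injection hab
    rcases List.eq_nil_or_concat b with hb | ⟨b', e, hb⟩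
    · subst hb
      have h2 := List.append_inj' h1 (by rfl)
      exact ⟨[], [], by simp [h2.1], Or.inl rfl, Or.inl rfl⟩
    · subst hb
      have h3 : (m ++ '/' :: b') ++ [e] = cs ++ ['/'] := by
        simpa [List.concat_eq_append, List.append_assoc] using h1
      have h4 := List.append_inj' h3 (by rfl)
      exact ⟨[], '/' :: b', by simp [← h4.1], Or.inl rfl, Or.inr ⟨b', rfl⟩⟩
  | cons a0 a' =>
    simp only [List.cons_append, List.append_assoc, List.nil_append] at hab
    have h1 : a' ++ '/' :: (m ++ '/' :: b) = cs ++ ['/'] := by injection hab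
    rcases List.eq_nil_or_concat b with hb | ⟨b', e, hb⟩
    · subst hb
      have h3 : (a' ++ '/' :: m) ++ ['/'] = cs ++ ['/'] := by
        simpa [List.append_assoc] using h1
      have h4 := List.append_inj' h3 (by rfl)
      exact ⟨a' ++ ['/'], [], by simp [← h4.1], Or.inr ⟨a', rfl⟩, Or.inl rfl⟩
    · subst hb
      have h3 : (a' ++ '/' :: (m ++ '/' :: b')) ++ [e] = cs ++ ['/'] := by
        simpa [List.concat_eq_append, List.append_assoc] using h1
      have h4 := List.append_inj' h3 (by rfl)
      exact ⟨a' ++ ['/'], '/' :: b', by simp [← h4.1], Or.inr ⟨a', rfl⟩, Or.inr ⟨b', rfl⟩⟩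

theorem infix_padded_mpr (cs m : List Char) :
    (∃ x y, cs = x ++ m ++ y ∧ (x = [] ∨ ∃ x0, x = x0 ++ ['/'])
          ∧ (y = [] ∨ ∃ y', y = '/' :: y'))
      → ('/' :: m ++ ['/']) <:+: ('/' :: cs ++ ['/']) := by
  rintro ⟨x, y, hcs, hx, hy⟩
  subst hcs
  rcases hx with hx | ⟨x0, hx⟩ <;> rcases hy with hy | ⟨y', hy⟩ <;> subst hx <;> subst hy
  · exact ⟨[], [], by simp⟩
  · exact ⟨[], y' ++ ['/'], by simp⟩
  · exact ⟨'/' :: x0, [], by simp⟩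
  · exact ⟨'/' :: x0, y' ++ ['/'], by simp⟩

theorem mem_pvSplit_decomp (n : Nat) : ∀ (cs m : List Char), cs.length ≤ n → m ∈ pvSplit cs →
    ∃ x y, cs = x ++ m ++ y ∧ (x = [] ∨ ∃ x0, x = x0 ++ ['/'])
        ∧ (y = [] ∨ ∃ y', y = '/' :: y') := by
  induction n with
  | zero =>
    intro cs m hn hmem
    have hcs : cs = [] := List.length_eq_zero_iff.mp (by omega)
    subst hcs
    have hm0 : m = [] := by simpa [pvSplit] using hmem
    exact ⟨[], [], by simp [hm0], Or.inl rfl, Or.inl rfl⟩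
  | succ n ih =>
    intro cs m hn hmem
    rcases pvSplit_cases cs with ⟨_, heq⟩ | ⟨h, rest, hdec, _, heq⟩
    · rw [heq] at hmem
      have hm0 : m = cs := by simpa using hmem
      exact ⟨[], [], by simp [hm0], Or.inl rfl, Or.inl rfl⟩
    · rw [heq] at hmem
      rcases List.mem_cons.mp hmem with hm | hm
      · exact ⟨[], '/' :: rest, by simp [hdec, hm], Or.inl rfl, Or.inr ⟨rest, rfl⟩⟩
      · have hlen : rest.length ≤ n := by
          have : cs.length = h.length + rest.length + 1 := by simp [hdec]; omega
          omega
        obtain ⟨x, y, hxy, hx, hy⟩ := ih rest m hlen hm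
        refine ⟨h ++ '/' :: x, y, by simp [hdec, hxy], Or.inr ?_, hy⟩
        cases hx with
        | inl h0 => exact ⟨h, by simp [h0]⟩
        | inr h0 => obtain ⟨x0, hx0⟩ := h0; exact ⟨h ++ '/' :: x0, by simp [hx0]⟩

theorem mem_pvSplit_of_decomp (cs m : List Char) (hm : '/' ∉ m) :
    (∃ x y, cs = x ++ m ++ y ∧ (x = [] ∨ ∃ x0, x = x0 ++ ['/'])
        ∧ (y = [] ∨ ∃ y', y = '/' :: y')) → m ∈ pvSplit cs := by
  rintro ⟨x, y, hcs, hx, hy⟩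
  subst hcs
  have base : ∀ y0, (y0 = [] ∨ ∃ y', y0 = '/' :: y') → m ∈ pvSplit (m ++ y0) := by
    rintro y0 (rfl | ⟨y', rfl⟩)
    · rw [List.append_nil, pvSplit_noslash m hm]; exact List.mem_singleton.mpr rfl
    · rw [pvSplit_app m y', pvSplit_noslash m hm]
      exact List.mem_append_left _ (List.mem_singleton.mpr rfl)
  rcases hx with rfl | ⟨x0, rfl⟩
  · simpa using base y hy
  · rw [show x0 ++ ['/'] ++ m ++ y = x0 ++ '/' :: (m ++ y) by simp, pvSplit_app]
    exact List.mem_append_right _ (base y hy)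

theorem marker_mem_iff (cs m : List Char) (hm : '/' ∉ m) :
    ('/' :: m ++ ['/']) <:+: ('/' :: cs ++ ['/']) ↔ m ∈ pvSplit cs :=
  ⟨fun h => mem_pvSplit_of_decomp cs m hm (infix_padded_mp cs m h),
   fun h => infix_padded_mpr cs m (mem_pvSplit_decomp cs.length cs m le_rfl h)⟩

theorem join_nil_flatten (l : List (List Char)) : PySem.Chars.join [] l = l.flatten := by
  induction l with
  | nil => rfl
  | cons x xs ih =>
    cases xs with
    | nil => simp [PySem.Chars.join_singleton]
    | cons y ys => simp_all [PySem.Chars.join_cons_cons]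

theorem pyGet_neg_succ (parts : List String) (j : Nat) (hj : j < parts.length) :
    PySem.List.pyGet? parts (-((j : Int) + 1)) = parts[parts.length - (j + 1)]? := by
  have h := PySem.List.pyGet?_neg_ofNat parts (j + 1) (by omega) (by omega)
  rw [← h]; congr 1

-- A's while-loop scans parts from the back: it returns the first non-empty element of
-- parts.reverse.drop j when the loop starts at lookback = -(j+1), given enough fuel.
theorem loopA_eq (dir : String) :
    ∀ (fuel : Nat) (parts : List String) (j : Nat),
      (∃ p ∈ parts.reverse.drop j, p ≠ "") →
      parts.length - j < fuel →
      pvLoopA dir parts (-((j : Int) + 1)) fuel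
        = ((parts.reverse.drop j).filter (fun p => p ≠ "")).headD "" := by
  intro fuel
  induction fuel with
  | zero => intro parts j _ hf; omega
  | succ f ih =>
    intro parts j hex hf
    by_cases hj : j < parts.length
    · have hjr : j < parts.reverse.length := by simpa using hj
      have hget : PySem.List.pyGet? parts (-((j : Int) + 1)) = some (parts.reverse[j]) := by
        rw [pyGet_neg_succ parts j hj, List.getElem_reverse]
        rw [List.getElem?_eq_getElem (by omega)]
        congr 1; congr 1; omega
      have hdrop : parts.reverse.drop j = parts.reverse[j] :: parts.reverse.drop (j + 1) :=
        List.drop_eq_getElem_cons hjr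
      rw [pvLoopA, hget]
      simp only []
      have hnb : ¬ (-((j : Int) + 1) - 1 > (parts.length : Int)) := by omega
      rw [if_neg hnb]
      by_cases hx : parts.reverse[j] = ""
      · rw [if_pos hx]
        have harg : -((j : Int) + 1) - 1 = -(((j + 1 : Nat) : Int) + 1) := by push_cast; ring
        rw [harg, ih parts (j + 1)]
        · rw [hdrop, List.filter_cons_of_neg (by simpa using hx)]
        · obtain ⟨p, hp, hpne⟩ := hex
          rw [hdrop] at hp
          rcases List.mem_cons.mp hp with h | h
          · exact absurd (h.trans hx) hpne
          · exact ⟨p, h, hpne⟩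
        · omega
      · rw [if_neg hx, hdrop, List.filter_cons_of_pos (by simpa using hx)]
        rfl
    · exfalso
      obtain ⟨p, hp, _⟩ := hex
      rw [List.drop_eq_nil_of_le (by simpa using not_lt.mp hj)] at hp
      exact absurd hp (List.not_mem_nil)

-- the piece of the relative path contributed by a suffix of parts
def pvPieces (l : List String) : String :=
  PySem.Str.join "" ((l.filter (fun p => p ≠ "")).map (fun p => p ++ "/"))

theorem pvPieces_cons (d : String) (l : List String) :
    pvPieces (d :: l) = (d ++ (if d ≠ "" then "/" else "")) ++ pvPieces l := by
  apply String.toList_inj.mp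
  by_cases hd : d = ""
  · subst hd
    simp [pvPieces]
  · rw [pvPieces, List.filter_cons_of_pos (by simpa using hd), List.map_cons]
    simp [hd, String.toList_append, PySem.Str.toList_join, join_nil_flatten, pvPieces]

-- A's fold once the flag is set: it appends pvPieces of the rest
theorem foldA_true (l : List String) : ∀ (s : String),
    l.foldl
      (fun (st : Bool × String) d =>
        let foundRoot := if d = "1.0 Financial" then true else st.1
        if foundRoot then
          (foundRoot, st.2 ++ d ++ (if d ≠ "" then "/" else ""))
        else (foundRoot, st.2))
      (true, s) = (true, s ++ pvPieces l) := by
  induction l with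
  | nil =>
    intro s
    rw [List.foldl_nil]
    have h : pvPieces [] = "" := rfl
    rw [h]
    apply congrArg (Prod.mk true)
    apply String.toList_inj.mp
    simp
  | cons d l ih =>
    intro s
    rw [List.foldl_cons]
    have hstep :
        (let foundRoot := if d = "1.0 Financial" then true else true
         if foundRoot then
           (foundRoot, s ++ d ++ (if d ≠ "" then "/" else ""))
         else (foundRoot, s)) = ((true : Bool), s ++ d ++ (if d ≠ "" then "/" else "")) := by
      by_cases hd : d = "1.0 Financial" <;> simp [hd]
    rw [hstep, ih, pvPieces_cons]
    apply congrArg (Prod.mk true)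
    simp [String.append_assoc]

-- A's fold before the flag is set: nothing happens
theorem foldA_false (l : List String) (hv : "1.0 Financial" ∉ l) : ∀ (s : String),
    l.foldl
      (fun (st : Bool × String) d =>
        let foundRoot := if d = "1.0 Financial" then true else st.1
        if foundRoot then
          (foundRoot, st.2 ++ d ++ (if d ≠ "" then "/" else ""))
        else (foundRoot, st.2))
      (false, s) = (false, s) := by
  induction l with
  | nil => intro s; rfl
  | cons d l ih =>
    intro s
    have hd : d ≠ "1.0 Financial" := fun h => hv (h ▸ List.mem_cons_self ..)
    rw [List.foldl_cons]
    simp only [if_neg hd, Bool.false_eq_true, if_false]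
    exact ih (fun h => hv (List.mem_cons_of_mem _ h)) s

-- A's fold over the decomposed list
theorem foldA_split (pre suf : List String) (hpre : "1.0 Financial" ∉ pre) :
    (pre ++ "1.0 Financial" :: suf).foldl
      (fun (st : Bool × String) d =>
        let foundRoot := if d = "1.0 Financial" then true else st.1
        if foundRoot then
          (foundRoot, st.2 ++ d ++ (if d ≠ "" then "/" else ""))
        else (foundRoot, st.2))
      (false, "") = (true, pvPieces ("1.0 Financial" :: suf)) := by
  rw [List.foldl_append, foldA_false pre hpre, List.foldl_cons]
  have hstep :
      (let foundRoot := if ("1.0 Financial" : String) = "1.0 Financial" then true else false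
       if foundRoot then
         (foundRoot, "" ++ "1.0 Financial" ++ (if ("1.0 Financial" : String) ≠ "" then "/" else ""))
       else (foundRoot, ("" : String))) = ((true : Bool), ("1.0 Financial/" : String)) := by
    decide
  rw [hstep, foldA_true, pvPieces_cons]
  have h : ("1.0 Financial" ++ if ("1.0 Financial" : String) ≠ "" then "/" else "") = "1.0 Financial/" := by decide
  rw [h]

-- B's front-drop loop on the first-occurrence decomposition
theorem pvDropRec_eq (pre suf : List String) (hpre : "1.0 Financial" ∉ pre) :
    pvDropRec (pre ++ "1.0 Financial" :: suf) = "1.0 Financial" :: suf := by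
  induction pre with
  | nil => simp [pvDropRec]
  | cons p pre ih =>
    have hp : p ≠ "1.0 Financial" := fun h => hpre (h ▸ List.mem_cons_self ..)
    rw [List.cons_append, pvDropRec, if_neg hp]
    exact ih (fun h => hpre (List.mem_cons_of_mem _ h))

-- ===== VERDICT (by name: the statement is the Claim_ definition above) =====
theorem dropWhile_head_false {α : Type} (p : α → Bool) (l : List α) (x : α) (xs : List α)
    (h : List.dropWhile p l = x :: xs) : p x = false := by
  induction l with
  | nil => simp [List.dropWhile] at h
  | cons a t ih =>
    rw [List.dropWhile_cons] at h
    by_cases hp : p a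
    · rw [if_pos hp] at h; exact ih h
    · rw [if_neg hp] at h
      injection h with h1 _
      rw [← h1]
      simpa using hp

theorem headD_filter_shape (A : List String) (b : String) (k : Nat) (hb : b ≠ "") :
    ((((A ++ [b]) ++ List.replicate k "").reverse.filter (fun p => p ≠ "")).headD "") = b := by
  rw [List.reverse_append, List.reverse_replicate, List.reverse_append, List.reverse_singleton]
  rw [List.filter_append, List.filter_append, List.filter_replicate]
  rw [if_neg (by decide), List.filter_cons_of_pos (by simpa using hb)]
  simp

theorem getRelativeDir_spec : Claim_equal_getRelativeDir := by
  unfold Claim_equal_getRelativeDir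
  intro directory _ hpre
  unfold Spec_getRelativeDir getRelativeDir getRelativeDir_alt
  simp only []
  unfold Pre_getRelativeDir at hpre
  obtain ⟨c0, hc0mem, hc0d⟩ := List.any_eq_true.mp hpre
  have hc0 : ¬ (c0 = '/') := by simpa using hc0d
  set cs := directory.toList with hcsdef
  -- strip the trailing slashes
  set w := cs.reverse.dropWhile (fun c => c = '/') with hwdef
  have hwne : w ≠ [] := by
    intro h0
    have hall := List.dropWhile_eq_nil_iff.mp h0 c0 (List.mem_reverse.mpr hc0mem)
    simp at hall
    exact hc0 hall
  obtain ⟨w0, w', hwcons⟩ := List.exists_cons_of_ne_nil hwne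
  have hw0 : ¬ (w0 = '/') := by
    have hh := dropWhile_head_false _ _ _ _ (hwdef ▸ hwcons)
    simpa using hh
  -- split off the last segment (in reversed order)
  set vrev := w.takeWhile (fun c => ¬ (c = '/')) with hvrevdef
  set rest := w.dropWhile (fun c => ¬ (c = '/')) with hrestdef
  have hwsplit : vrev ++ rest = w := List.takeWhile_append_dropWhile
  have hvne : vrev ≠ [] := by
    rw [hvrevdef, hwcons, List.takeWhile_cons, if_pos (by simpa using hw0)]
    simp
  have hvnos : '/' ∉ vrev.reverse := by
    intro hmem
    have := List.mem_takeWhile_imp (hvrevdef ▸ List.mem_reverse.mp hmem)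
    simp at this
  have hvrne : vrev.reverse ≠ [] := by simpa using hvne
  -- the input is trimmed ++ trailing slashes
  set k := (cs.reverse.takeWhile (fun c => c = '/')).length with hkdef
  have hrep : cs.reverse.takeWhile (fun c => c = '/') = List.replicate k '/' := by
    rw [hkdef]
    exact List.eq_replicate_of_mem (fun b hb => by simpa using List.mem_takeWhile_imp hb)
  have hk : cs = w.reverse ++ List.replicate k '/' := by
    have h1 : cs.reverse = List.replicate k '/' ++ w := by
      rw [← hrep, hwdef]; exact List.takeWhile_append_dropWhile.symm
    calc cs = cs.reverse.reverse := (List.reverse_reverse cs).symm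
    _ = (List.replicate k '/' ++ w).reverse := by rw [← h1]
    _ = w.reverse ++ List.replicate k '/' := by
        rw [List.reverse_append, List.reverse_replicate]
  -- the split of the input
  set parts := (PySem.Str.split? directory "/").getD [] with hpartsdef
  have hparts : parts = (pvSplit cs).map String.ofList := by
    rw [hpartsdef, parts_eq, hcsdef]
  -- the localDir computed by B, and the shape of the split, by cases on rest
  have hmain : ∃ P, pvSplit w.reverse = P ++ [vrev.reverse] ∧
      (PySem.Str.slice (String.ofList w.reverse)
        (some (PySem.Str.rfind (String.ofList w.reverse) "/" + 1)) none).toList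
        = vrev.reverse := by
    have hslash : ("/" : String).toList = ['/'] := by decide
    cases hr : rest with
    | nil =>
      have hwv : w.reverse = vrev.reverse := by rw [← hwsplit, hr, List.append_nil]
      have hrf : PySem.Str.rfind (String.ofList w.reverse) "/" = -1 := by
        rw [PySem.Str.rfind_eq, String.toList_ofList, hslash, hwv, PySem.Chars.rfind]
        exact rfind_go_noslash _ hvnos _
      refine ⟨[], by rw [hwv, pvSplit_noslash _ hvnos]; simp, ?_⟩
      rw [hrf, PySem.Str.toList_slice, String.toList_ofList]
      norm_num
      rw [← hwsplit, hr, List.append_nil]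
    | cons r0 r' =>
      have hr0 : r0 = '/' := by
        have hh := dropWhile_head_false _ _ _ _ (hrestdef ▸ hr)
        simpa using hh
      have hwv : w.reverse = r'.reverse ++ '/' :: vrev.reverse := by
        rw [← hwsplit, hr, hr0]
        simp
      have hrf : PySem.Str.rfind (String.ofList w.reverse) "/" = (r'.reverse.length : Int) := by
        rw [PySem.Str.rfind_eq, String.toList_ofList, hslash, hwv, PySem.Chars.rfind]
        have hlen : (r'.reverse ++ '/' :: vrev.reverse).length
            = r'.reverse.length + (vrev.reverse.length + 1) := by simp
        rw [hlen]
        exact rfind_go_found _ _ hvnos _ (by omega)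
      refine ⟨pvSplit r'.reverse, ?_, ?_⟩
      · rw [hwv, pvSplit_app, pvSplit_noslash _ hvnos]
      · rw [hrf, PySem.Str.toList_slice, String.toList_ofList]
        rw [show (r'.reverse.length : Int) + 1 = ((r'.reverse.length + 1 : Nat) : Int) by push_cast; ring]
        rw [hwv]
        simp only [PySem.Chars.slice_eq_listSlice, PySem.List.slice_from_natCast]
        rw [show r'.reverse ++ '/' :: vrev.reverse = (r'.reverse ++ ['/']) ++ vrev.reverse by simp]
        rw [show r'.reverse.length + 1 = (r'.reverse ++ ['/']).length by simp]
        exact List.drop_left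
  obtain ⟨P, hP, hBloc⟩ := hmain
  -- pvSplit cs and parts
  have hsplitcs : pvSplit cs = (P ++ [vrev.reverse]) ++ List.replicate k [] := by
    rw [hk, pvSplit_app_rep, hP]
  have hofv : String.ofList vrev.reverse ≠ "" := by
    intro h0
    exact hvrne (by simpa using congrArg String.toList h0)
  have hpartsform : parts = (P.map String.ofList ++ [String.ofList vrev.reverse])
      ++ List.replicate k "" := by
    rw [hparts, hsplitcs]
    simp [List.map_append, List.map_replicate]
  -- A's localDir
  have hex : ∃ p ∈ parts.reverse.drop 0, p ≠ "" := by
    refine ⟨String.ofList vrev.reverse, ?_, hofv⟩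
    rw [List.drop_zero, List.mem_reverse, hpartsform]
    simp
  have hloc := loopA_eq directory (parts.length + 1) parts 0 hex (by omega)
  simp only [Nat.cast_zero, zero_add, List.drop_zero] at hloc
  have hfiltered : (parts.reverse.filter (fun p => p ≠ "")).headD ""
      = String.ofList vrev.reverse := by
    rw [hpartsform]
    exact headD_filter_shape _ _ _ hofv
  -- B's condition versus membership of the marker
  have hM : ("1.0 Financial" : String).toList ∈ pvSplit cs ↔ ("1.0 Financial" : String) ∈ parts := by
    rw [hparts]
    constructor
    · intro h
      exact List.mem_map.mpr ⟨_, h, by decide⟩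
    · intro h
      obtain ⟨a, ha, hae⟩ := List.mem_map.mp h
      have ha2 : a = ("1.0 Financial" : String).toList := by
        have := congrArg String.toList hae
        simpa using this
      exact ha2 ▸ ha
  have hcond : (PySem.Str.isIn "/1.0 Financial/" ("/" ++ directory ++ "/") = true)
      ↔ ("1.0 Financial" : String) ∈ parts := by
    rw [PySem.Str.isIn_eq]
    have h1 : ("/" ++ directory ++ "/").toList = '/' :: cs ++ ['/'] := by
      rw [String.toList_append, String.toList_append, ← hcsdef,
        show ("/" : String).toList = ['/'] from by decide]
      simp
    have h2 : ("/1.0 Financial/" : String).toList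
        = '/' :: ("1.0 Financial" : String).toList ++ ['/'] := by decide
    rw [h1, h2, PySem.Chars.isIn_iff_infix, marker_mem_iff cs _ (by decide)]
    exact hM
  -- put the two components together
  refine Prod.ext ?_ ?_
  · -- relative path
    show _ = _
    by_cases hm : ("1.0 Financial" : String) ∈ parts
    · have hsome : (PySem.List.index? parts "1.0 Financial").isSome :=
        (PySem.List.index?_isSome_iff parts _).mpr hm
      obtain ⟨kk, hkk⟩ := Option.isSome_iff_exists.mp hsome
      obtain ⟨pre, suf, hsplit, _, hvpre⟩ := (PySem.List.index?_eq_some_iff parts _ kk).mp hkk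
      have hfold := foldA_split pre suf hvpre
      rw [← hsplit] at hfold
      rw [hfold]
      rw [if_pos (hcond.mpr hm)]
      simp only [Bool.true_eq_false, if_false]
      rw [hsplit, pvDropRec_eq pre suf hvpre]
      rfl
    · have hfold := foldA_false parts hm ""
      rw [hfold]
      rw [if_neg (fun h => hm (hcond.mp h))]
      simp
  · -- local segment
    show pvLoopA directory parts (-1) (parts.length + 1)
      = PySem.Str.slice (String.ofList w.reverse)
          (some (PySem.Str.rfind (String.ofList w.reverse) "/" + 1)) none
    rw [hloc, hfiltered]
    apply String.toList_inj.mp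
    rw [hBloc]
    simp
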